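-- pv_equiv track=rewrite | github.com/vjeranc/expr-trees | analytic_gf.py | schroeder_numbers
-- ===== SOURCE A (Python) =====
-- def schroeder_numbers(limit: int) -> list[int]:
-- 	vals = [0]*(limit+1)
-- 	vals[0] = 1
-- 	for n in range(1, limit+1):
-- 		vals[n] = vals[n-1]
-- 		for k in range(n):
-- 			vals[n] += vals[k]*vals[n-1-k]
-- 	return vals
-- ===== SOURCE B (Python) =====
-- def schroeder_numbers(limit: int) -> list[int]:
--     vals = [1]
--     prev, cur = 1, 1
--     for n in range(1, limit + 1):
--         prev, cur = cur, ((6 * n - 3) * cur - (n - 2) * prev) // (n + 1)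
--         vals.append(cur)
--     return vals
-- ===== Notes on version B (the rewrite author's own statement) =====
-- stated objective: faster
-- what changed: B replaces A's quadratic self-convolution DP (inner loop summing vals[k]*vals[n-1-k]) by the linear three-term recurrence (n+1)S_n = (6n-3)S_{n-1} - (n-2)S_{n-2} with exact integer division, keeping only the last two values.
import Mathlib
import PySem

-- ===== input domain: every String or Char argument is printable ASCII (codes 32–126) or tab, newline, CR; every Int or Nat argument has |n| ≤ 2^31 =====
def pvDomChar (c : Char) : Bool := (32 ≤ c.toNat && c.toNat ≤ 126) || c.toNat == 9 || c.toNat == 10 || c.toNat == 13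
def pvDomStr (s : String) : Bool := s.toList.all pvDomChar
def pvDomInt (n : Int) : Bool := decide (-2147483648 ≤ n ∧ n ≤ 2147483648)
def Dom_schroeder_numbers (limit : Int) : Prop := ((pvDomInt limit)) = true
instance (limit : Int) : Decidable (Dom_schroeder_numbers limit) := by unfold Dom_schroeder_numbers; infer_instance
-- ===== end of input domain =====

-- B replaces A's quadratic convolution loop by the linear three-term recurrence (n+1)S_n = (6n-3)S_(n-1) - (n-2)S_(n-2) with exact division (objective: faster, O(n) arithmetic operations instead of O(n^2)).


-- ===== PORT A =====
-- xs[i] for an index that is (under Pre_) always in range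
def pvGetZ (xs : List Int) (i : Int) : Int := PySem.List.pyGetD xs i 0

def schroeder_numbers (limit : Int) : List Int :=
  let vals := List.replicate (limit + 1).toNat 0
  let vals := vals.set 0 1
  (PySem.List.pyRange 1 (limit + 1) 1).foldl (fun vals n =>
    let vals := vals.set n.toNat (pvGetZ vals (n - 1))
    (PySem.List.pyRange 0 n 1).foldl (fun vals k =>
      vals.set n.toNat (pvGetZ vals n + pvGetZ vals k * pvGetZ vals (n - 1 - k))) vals) vals

-- ===== PORT B =====
-- loop body of Source B: state is (vals, prev, cur)
def pvStepB (st : List Int × Int × Int) (n : Int) : List Int × Int × Int :=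
  let prev := st.2.1
  let cur := st.2.2
  let nxt := PySem.Int.floordiv ((6 * n - 3) * cur - (n - 2) * prev) (n + 1)
  (st.1 ++ [nxt], cur, nxt)

def schroeder_numbers_alt (limit : Int) : List Int :=
  ((PySem.List.pyRange 1 (limit + 1) 1).foldl pvStepB ([1], 1, 1)).1

-- ===== PRECONDITION & SPEC =====
-- A raises IndexError for negative limit (its preallocated list is empty, so the first assignment fails).
def Pre_schroeder_numbers (limit : Int) : Prop := 0 ≤ limit
instance (limit : Int) : Decidable (Pre_schroeder_numbers limit) := by
  unfold Pre_schroeder_numbers; infer_instance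

def pvWitness_schroeder_numbers : Int := 5

def Spec_schroeder_numbers (limit : Int) (out : List Int) : Prop := out = schroeder_numbers_alt limit
instance (limit : Int) (out : List Int) : Decidable (Spec_schroeder_numbers limit out) := by
  unfold Spec_schroeder_numbers; infer_instance

-- ===== CLAIM (what is proved, stated in full; the proofs are below) =====
def Claim_equal_schroeder_numbers : Prop := ∀ (limit : Int), Dom_schroeder_numbers limit →
  Pre_schroeder_numbers limit → Spec_schroeder_numbers limit (schroeder_numbers limit)

-- ===== LEMMAS AND PROOFS =====

lemma list_sum_range {M : Type} [AddCommMonoid M] (f : Nat → M) (n : Nat) :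
    ((List.range n).map f).sum = ∑ k ∈ Finset.range n, f k := by
  induction n with
  | zero => simp
  | succ n ih =>
    rw [List.range_succ, Finset.sum_range_succ, List.map_append, List.sum_append, ih]; simp

-- Reference sequence: pvS m is the list of the first m+1 large Schröder numbers.
def pvConv (vs : List Int) : Int :=
  ((List.range vs.length).map (fun k => vs.getD k 0 * vs.getD (vs.length - 1 - k) 0)).sum

def pvS : Nat → List Int
  | 0 => [1]
  | m + 1 => pvS m ++ [(pvS m).getD m 0 + pvConv (pvS m)]

def pvSf (n : Nat) : Int := (pvS n).getD n 0

def pvPrev (m : Nat) : Int := if m = 0 then 1 else pvSf (m - 1)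

lemma pvS_length (m : Nat) : (pvS m).length = m + 1 := by
  induction m with
  | zero => rfl
  | succ m ih => simp [pvS, ih]

lemma pvSf_succ (m : Nat) : pvSf (m+1) = (pvS m).getD m 0 + pvConv (pvS m) := by
  have h : (pvS (m+1)).getD (m+1) 0 = (pvS m).getD m 0 + pvConv (pvS m) := by
    rw [pvS, show m + 1 = (pvS m).length from (pvS_length m).symm]
    simp [List.getD]
  exact h

lemma pvS_getD (m k : Nat) (h : k ≤ m) : (pvS m).getD k 0 = pvSf k := by
  induction m with
  | zero => interval_cases k; rfl
  | succ m ih =>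
    rcases Nat.lt_or_ge k (m+1) with hk | hk
    · rw [pvS, List.getD_append _ _ _ _ (by rw [pvS_length]; omega)]
      exact ih (by omega)
    · have : k = m + 1 := by omega
      subst this; rfl

lemma pvRec1 (m : Nat) :
    pvSf (m+1) = pvSf m + ∑ k ∈ Finset.range (m+1), pvSf k * pvSf (m-k) := by
  rw [pvSf_succ, pvS_getD m m le_rfl, pvConv, pvS_length]
  congr 1
  rw [list_sum_range]
  refine Finset.sum_congr rfl fun k hk => ?_
  simp only [Finset.mem_range] at hk
  rw [show m + 1 - 1 - k = m - k from by omega, pvS_getD m k (by omega),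
    pvS_getD m (m-k) (by omega)]

-- The generating function F = ∑ pvSf n · Xⁿ satisfies X·F² + (X-1)·F + 1 = 0.
def pvF : PowerSeries Int := PowerSeries.mk fun n => pvSf n

lemma pvF_eq : PowerSeries.X * pvF^2 + (PowerSeries.X - 1) * pvF + 1 = 0 := by
  ext n
  rcases n with _ | m
  · simp [pvF, pvSf, pvS, sub_mul]
  · rw [map_add, map_add, sub_mul, one_mul, map_sub, PowerSeries.coeff_succ_X_mul, pow_two,
      PowerSeries.coeff_mul, Finset.Nat.sum_antidiagonal_eq_sum_range_succ_mk,
      PowerSeries.coeff_succ_X_mul]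
    simp only [pvF, PowerSeries.coeff_mk, PowerSeries.coeff_one, Nat.succ_ne_zero, if_false,
      map_zero]
    have h := pvRec1 m
    linarith [h]

-- Differentiating the algebraic equation yields X(X²-6X+1)F' = (3X-1)F + X + 1.
lemma pvKey :
    (PowerSeries.X : PowerSeries Int)^3 * (PowerSeries.derivative Int pvF)
      - PowerSeries.C (R := Int) 6 * (PowerSeries.X^2 * (PowerSeries.derivative Int pvF))
      + PowerSeries.X * (PowerSeries.derivative Int pvF)
    = PowerSeries.C (R := Int) 3 * (PowerSeries.X * pvF) - pvF + PowerSeries.X + 1 := by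
  have hd := congrArg (PowerSeries.derivative Int) pvF_eq
  simp only [map_add, Derivation.leibniz, PowerSeries.derivative_pow, PowerSeries.derivative_X,
    smul_eq_mul, map_zero, Derivation.map_one_eq_zero, map_sub] at hd
  have hC6 : (PowerSeries.C (R := Int) 6) = (6 : PowerSeries Int) := by simp
  have hC3 : (PowerSeries.C (R := Int) 3) = (3 : PowerSeries Int) := by simp
  rw [hC6, hC3]
  linear_combination (PowerSeries.X*(2*PowerSeries.X*pvF+PowerSeries.X-1))*hd
    - (4*PowerSeries.X^2*(PowerSeries.derivative Int pvF) + 2*PowerSeries.X*pvF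
       + PowerSeries.X + 1)*pvF_eq

-- Coefficient extraction: the linear three-term recurrence, for n = m+3 ≥ 3.
lemma pvRec (m : Nat) :
    ((m:Int)+4) * pvSf (m+3) = (6*(m:Int)+15) * pvSf (m+2) - ((m:Int)+1) * pvSf (m+1) := by
  have h := congrArg (PowerSeries.coeff (m+3)) pvKey
  have e1 : PowerSeries.coeff (m+3)
      ((PowerSeries.X : PowerSeries Int)^3 * (PowerSeries.derivative Int pvF))
      = PowerSeries.coeff m (PowerSeries.derivative Int pvF) :=
    PowerSeries.coeff_X_pow_mul _ 3 m
  have e2 : PowerSeries.coeff (m+3)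
      ((PowerSeries.X : PowerSeries Int)^2 * (PowerSeries.derivative Int pvF))
      = PowerSeries.coeff (m+1) (PowerSeries.derivative Int pvF) :=
    PowerSeries.coeff_X_pow_mul _ 2 (m+1)
  simp only [map_add, map_sub] at h
  rw [e1, PowerSeries.coeff_C_mul, e2, PowerSeries.coeff_C_mul, PowerSeries.coeff_succ_X_mul,
    PowerSeries.coeff_succ_X_mul, PowerSeries.coeff_derivative, PowerSeries.coeff_derivative,
    PowerSeries.coeff_derivative] at h
  simp only [pvF, PowerSeries.coeff_mk, PowerSeries.coeff_X, PowerSeries.coeff_one,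
    Nat.succ_ne_zero, if_false] at h
  push_cast at h ⊢
  linarith [h]

-- B's division step is exact and lands on the next Schröder number.
lemma pvDivStep (m : Nat) :
    PySem.Int.floordiv ((6 * ((m:Int)+1) - 3) * pvSf m - (((m:Int)+1) - 2) * pvPrev m)
      (((m:Int)+1) + 1) = pvSf (m+1) := by
  match m with
  | 0 => decide
  | 1 => decide
  | (k+2) =>
    have hrec := pvRec k
    have hnum : (6 * (((k+2:Nat):Int)+1) - 3) * pvSf (k+2)
        - ((((k+2:Nat):Int)+1) - 2) * pvPrev (k+2) = ((k:Int)+4) * pvSf (k+3) := by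
      simp only [pvPrev, show k+2 ≠ 0 from by omega, if_false, show k+2-1 = k+1 from rfl]
      push_cast
      linear_combination -hrec
    rw [hnum, show (((k+2:Nat):Int)+1) + 1 = (k:Int) + 4 from by push_cast; ring,
      PySem.Int.floordiv_eq_ediv_of_pos (by positivity),
      Int.mul_ediv_cancel_left _ (by omega)]

-- B's loop invariant.
lemma b_fold (m : Nat) :
    (PySem.List.pyRange 1 ((m:Int) + 1) 1).foldl pvStepB ([1], 1, 1)
      = (pvS m, pvPrev m, pvSf m) := by
  induction m with
  | zero => simp [PySem.List.pyRange_one_eq_nil, pvPrev]; exact ⟨rfl, rfl⟩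
  | succ m ih =>
    rw [show (((m+1:Nat)):Int) + 1 = ((m:Int) + 1) + 1 by push_cast; ring,
      PySem.List.pyRange_one_succ_right (by omega), List.foldl_append, ih]
    simp only [List.foldl_cons, List.foldl_nil, pvStepB]
    rw [pvDivStep m]
    refine Prod.ext ?_ (Prod.ext ?_ rfl)
    · show pvS m ++ [pvSf (m+1)] = pvS (m+1)
      rw [pvSf_succ, pvS]
    · show pvSf m = pvPrev (m+1)
      simp [pvPrev]

-- ===== A-side machinery (as in the convolution proof) =====
lemma getD_mid (P R : List Int) (c d : Int) : (P ++ c :: R).getD P.length d = c := by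
  simp [List.getD]

lemma getD_left (P R : List Int) (k : Nat) (h : k < P.length) (d : Int) :
    (P ++ R).getD k d = P.getD k d := List.getD_append P R d k h

lemma set_mid (P R : List Int) (c x : Int) : (P ++ c :: R).set P.length x = P ++ x :: R := by
  simp

lemma inner_loop (P R : List Int) (c : Int) (t : Nat) (ht : t ≤ P.length) :
    (PySem.List.pyRange 0 (t : Int) 1).foldl (fun vals k =>
        vals.set P.length (pvGetZ vals (P.length : Int) +
          pvGetZ vals k * pvGetZ vals ((P.length : Int) - 1 - k))) (P ++ c :: R) =
      P ++ (c + ((List.range t).map (fun k => P.getD k 0 * P.getD (P.length - 1 - k) 0)).sum) :: R := by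
  induction t with
  | zero => simp [PySem.List.pyRange_one_eq_nil]
  | succ t ih =>
    have h1 : ((t:Int) + 1) = (((t+1 : Nat)) : Int) := by push_cast; ring
    rw [← h1, PySem.List.pyRange_one_succ_right (by positivity), List.foldl_append,
      ih (by omega)]
    simp only [List.foldl_cons, List.foldl_nil]
    have hrd : ((P.length : Int) - 1 - (t:Int)) = ((P.length - 1 - t : Nat) : Int) := by omega
    rw [hrd]
    simp only [pvGetZ, PySem.List.pyGetD_natCast]
    rw [getD_mid, set_mid, getD_left _ _ _ (by omega), getD_left _ _ _ (by omega)]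
    rw [List.range_succ]
    simp [add_assoc]

lemma a_fold (L m : Nat) (hm : m ≤ L) :
    (PySem.List.pyRange 1 ((m:Int) + 1) 1).foldl (fun vals n =>
      (PySem.List.pyRange 0 n 1).foldl (fun vals k =>
        vals.set n.toNat (pvGetZ vals n + pvGetZ vals k * pvGetZ vals (n - 1 - k)))
        (vals.set n.toNat (pvGetZ vals (n - 1))))
      (pvS 0 ++ List.replicate L 0)
    = pvS m ++ List.replicate (L - m) 0 := by
  induction m with
  | zero => simp [PySem.List.pyRange_one_eq_nil]
  | succ m ih =>
    rw [show (((m+1:Nat)):Int) + 1 = ((m:Int) + 1) + 1 by push_cast; ring,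
      PySem.List.pyRange_one_succ_right (by omega), List.foldl_append,
      ih (by omega)]
    simp only [List.foldl_cons, List.foldl_nil]
    have hrep : List.replicate (L - m) (0:Int) = 0 :: List.replicate (L - m - 1) 0 := by
      rw [show L - m = (L - m - 1) + 1 by omega]
      rfl
    rw [hrep]
    have hPlen : (pvS m).length = m + 1 := pvS_length m
    have htn : ((m:Int) + 1).toNat = (pvS m).length := by rw [hPlen]; omega
    have hcast : ((m:Int) + 1) = ((pvS m).length : Int) := by rw [hPlen]; push_cast; ring
    have hprev : pvGetZ (pvS m ++ 0 :: List.replicate (L - m - 1) 0) (((m:Int) + 1) - 1)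
        = (pvS m).getD m 0 := by
      rw [show (((m:Int) + 1) - 1) = ((m:Nat):Int) by ring]
      rw [pvGetZ, PySem.List.pyGetD_natCast]
      exact getD_left _ _ _ (by omega) _
    rw [hprev, htn, set_mid]
    rw [hcast, inner_loop (pvS m) _ _ ((pvS m).length) (le_refl _)]
    rw [pvS]
    rw [List.append_cons (pvS m)]
    rw [pvConv, hPlen, show L - m - 1 = L - (m + 1) by omega]

-- ===== VERDICT =====
theorem schroeder_numbers_spec : Claim_equal_schroeder_numbers := by
  intro limit _ hpre
  unfold Pre_schroeder_numbers at hpre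
  unfold Spec_schroeder_numbers schroeder_numbers schroeder_numbers_alt
  obtain ⟨L, rfl⟩ : ∃ L : Nat, limit = (L:Int) := ⟨limit.toNat, by omega⟩
  have hstart : (List.replicate ((L:Int) + 1).toNat (0:Int)).set 0 1
      = pvS 0 ++ List.replicate L 0 := by
    rw [show ((L:Int) + 1).toNat = L + 1 by omega, List.replicate_succ]
    rfl
  simp only [hstart]
  rw [a_fold L L (le_refl L), b_fold L]
  simp
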